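-- pv_equiv track=rewrite | github.com/Jpmcrespo/IST-FP | Projeto Credit Cards/Projeto1_Joao Crespo.py | calc_soma
-- ===== SOURCE A (Python) =====
-- def calc_soma(n):
--
--
--         """Esta funcao recebe uma cadeia de carateres correspondente a um numero inteiro associado a um cartao de credito sem o ultimo digito. a funcao calcula a soma de todos os digitos da cadeia de carateres da seguinte forma: primeiro inverte a cadeia, de seguida multiplica por 2 os digitos que se encontram em posicoes impares. se os digitos multiplicados por 2 forem (estritamente) maiores que 9, o programa subtrai 9 ao numero obtido e o resultado  e o que conta para o calculo da soma dos digitos da cadeia de caracteres."""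
--
--
--         x=int(n)
--         soma=0
--         while x>0:
--                 if (x%10)*2>=10:
--                         soma = soma + (x%10)*2 - 9                      #em vez de inverter e multiplicar os impares, fui de tras para a frente
--                         x=x//10
--                 else:
--                         soma = soma + (x%10)*2
--                         x=x//10
--                 soma = soma +(x%10)
--                 x=x//10
--         return(soma)
-- ===== SOURCE B (Python) =====
-- def calc_soma(n):
--     """Luhn-style weighted digit sum: single indexed pass over the decimal
--     string of int(n), doubling digits at even positions from the right."""
--     x = int(n)
--     if x <= 0:
--         return 0
--     soma = 0
--     for i, c in enumerate(reversed(str(x))):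
--         d = ord(c) - ord('0')
--         if i % 2 == 0:
--             d *= 2
--             if d > 9:
--                 d -= 9
--         soma += d
--     return soma
-- ===== Notes on version B (the rewrite author's own statement) =====
-- stated objective: simpler
-- what changed: Replaces A's two-digits-per-iteration mod/floordiv while-loop over the integer with a single indexed pass over the reversed decimal string of int(n), doubling digits at even indices.
import Mathlib
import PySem

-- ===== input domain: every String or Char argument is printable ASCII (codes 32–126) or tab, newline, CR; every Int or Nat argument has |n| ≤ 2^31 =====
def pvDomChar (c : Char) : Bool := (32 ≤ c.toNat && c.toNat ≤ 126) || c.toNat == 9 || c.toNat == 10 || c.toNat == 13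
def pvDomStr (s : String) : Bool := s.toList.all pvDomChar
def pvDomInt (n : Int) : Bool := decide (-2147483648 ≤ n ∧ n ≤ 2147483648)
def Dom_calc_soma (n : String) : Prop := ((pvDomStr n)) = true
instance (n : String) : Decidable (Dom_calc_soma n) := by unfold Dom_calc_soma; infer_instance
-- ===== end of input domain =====

-- B replaces A's two-digits-per-iteration mod/floordiv while-loop with one indexed
-- pass over the reversed decimal string of int(n) (simpler decomposition, same cost).

-- ===== PORT A =====
-- the while x>0 loop of A: processes two decimal digits per iteration
def calcA_loop (x soma : Int) : Int :=
  if h : 0 < x then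
    let soma1 := if (PySem.Int.mod x 10) * 2 ≥ 10
      then soma + (PySem.Int.mod x 10) * 2 - 9
      else soma + (PySem.Int.mod x 10) * 2
    let x1 := PySem.Int.floordiv x 10
    let soma2 := soma1 + PySem.Int.mod x1 10
    let x2 := PySem.Int.floordiv x1 10
    calcA_loop x2 soma2
  else soma
termination_by x.toNat
decreasing_by
  simp only [PySem.Int.floordiv_eq_ediv_of_pos (a := x) (by omega : (0:Int) < 10),
    PySem.Int.floordiv_eq_ediv_of_pos (a := x / 10) (by omega : (0:Int) < 10)]
  omega

def calc_soma (n : String) : Int :=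
  match PySem.Int.ofStr? n with
  | some x => calcA_loop x 0
  | none => 0   -- int(n) raises ValueError: excluded by Pre_calc_soma

-- ===== PORT B =====
-- the for-loop of B: `for i, c in enumerate(reversed(str(x)))`
def calcB_loop : List Char → Int → Int → Int
  | [], _, soma => soma
  | c :: rest, i, soma =>
    let d := (c.toNat : Int) - 48
    let d' := if PySem.Int.mod i 2 = 0
      then (if d * 2 > 9 then d * 2 - 9 else d * 2)
      else d
    calcB_loop rest (i + 1) (soma + d')

def calc_soma_alt (n : String) : Int :=
  match PySem.Int.ofStr? n with
  | some x => if x ≤ 0 then 0 else calcB_loop (PySem.Int.toChars x).reverse 0 0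
  | none => 0   -- int(n) raises ValueError: excluded by Pre_calc_soma

-- ===== PRECONDITION & SPEC =====
-- Pre_ excludes exactly the strings on which int(n) raises ValueError (A returns nowhere there)
def Pre_calc_soma (n : String) : Prop := (PySem.Int.ofStr? n).isSome = true
instance (n : String) : Decidable (Pre_calc_soma n) := by unfold Pre_calc_soma; infer_instance
def pvWitness_calc_soma : String := ("139")

def Spec_calc_soma (n : String) (out : Int) : Prop := out = calc_soma_alt n
instance (n : String) (out : Int) : Decidable (Spec_calc_soma n out) := by unfold Spec_calc_soma; infer_instance

-- ===== CLAIM (what is proved, stated in full; the proofs are below) =====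
def Claim_equal_calc_soma : Prop := ∀ (n : String), Dom_calc_soma n → Pre_calc_soma n → Spec_calc_soma n (calc_soma n)

-- ===== LEMMAS AND PROOFS =====

-- only the parity of the index matters to B's loop
lemma calcB_loop_shift (l : List Char) (i soma : Int) :
    calcB_loop l (i + 2) soma = calcB_loop l i soma := by
  induction l generalizing i soma with
  | nil => rfl
  | cons c rest ih =>
    simp only [calcB_loop]
    have hmod : PySem.Int.mod (i + 2) 2 = PySem.Int.mod i 2 := by
      simp [PySem.Int.mod]
    rw [hmod, show i + 2 + 1 = i + 1 + 2 by ring, ih]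

lemma digitChar_toNat (k : Nat) (hk : k < 10) :
    ((Nat.digitChar k).toNat : Int) - 48 = (k : Int) := by
  interval_cases k <;> decide

-- structural recursion for Nat.toDigits: peel the least-significant digit
lemma toDigitsCore_append (f n : Nat) (ds : List Char) :
    Nat.toDigitsCore 10 f n ds = Nat.toDigitsCore 10 f n [] ++ ds := by
  induction f generalizing n ds with
  | zero => simp [Nat.toDigitsCore]
  | succ f ih =>
    simp only [Nat.toDigitsCore]
    by_cases h : n / 10 = 0
    · simp [h]
    · simp only [h, if_false]
      rw [ih (n / 10) (Nat.digitChar (n % 10) :: ds), ih (n / 10) [Nat.digitChar (n % 10)]]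
      simp

lemma toDigitsCore_fuel (f f' n : Nat) (hn : n < f) (hn' : n < f') (ds : List Char) :
    Nat.toDigitsCore 10 f n ds = Nat.toDigitsCore 10 f' n ds := by
  induction f generalizing f' n ds with
  | zero => omega
  | succ f ih =>
    obtain ⟨f'', rfl⟩ : ∃ g, f' = g + 1 := ⟨f' - 1, by omega⟩
    simp only [Nat.toDigitsCore]
    by_cases h : n / 10 = 0
    · simp [h]
    · simp only [h, if_false]
      exact ih f'' (n / 10) (by omega) (by omega) _

lemma toDigits_step (m : Nat) :
    Nat.toDigits 10 m = if m < 10 then [Nat.digitChar m]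
      else Nat.toDigits 10 (m / 10) ++ [Nat.digitChar (m % 10)] := by
  by_cases h : m < 10
  · rw [if_pos h]
    simp only [Nat.toDigits, Nat.toDigitsCore]
    rw [if_pos (by omega), Nat.mod_eq_of_lt h]
  · rw [if_neg h]
    conv_lhs => simp only [Nat.toDigits, Nat.toDigitsCore]
    rw [if_neg (by omega), toDigitsCore_append,
      toDigitsCore_fuel m (m / 10 + 1) (m / 10) (by omega) (by omega)]
    rfl

lemma calcA_zero (s : Int) : calcA_loop 0 s = s := by
  rw [calcA_loop]; norm_num

lemma natCast_mod10 (m : Nat) : PySem.Int.mod (m : Int) 10 = ((m % 10 : Nat) : Int) := by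
  rw [PySem.Int.mod_eq_emod_of_pos (by omega)]; push_cast; ring

lemma natCast_div10 (m : Nat) : PySem.Int.floordiv (m : Int) 10 = ((m / 10 : Nat) : Int) := by
  rw [PySem.Int.floordiv_eq_ediv_of_pos (by omega)]; push_cast [Int.natCast_div]; ring

-- main loop correspondence: B's single pass equals A's two-digit loop
lemma loop_eq (m : Nat) (hm : 0 < m) (soma : Int) :
    calcB_loop (Nat.toDigits 10 m).reverse 0 soma = calcA_loop (m : Int) soma := by
  induction m using Nat.strong_induction_on generalizing soma with
  | _ m ih =>
  rw [calcA_loop, dif_pos (by exact_mod_cast hm)]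
  simp only [natCast_mod10, natCast_div10]
  by_cases h10 : m < 10
  · -- one digit: A's second half adds 0, B's list is a singleton
    rw [toDigits_step, if_pos h10]
    simp only [List.reverse_singleton, calcB_loop, digitChar_toNat m (by omega)]
    rw [show m % 10 = m from Nat.mod_eq_of_lt h10,
        show m / 10 = 0 from Nat.div_eq_of_lt h10]
    simp only [Nat.zero_div, Nat.zero_mod, Nat.cast_zero, calcA_zero]
    have he : PySem.Int.mod 0 2 = 0 := by decide
    rw [he, if_pos rfl]
    split_ifs with h1 h2 h2 <;> [skip; omega; omega; skip] <;> ring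
  · -- at least two digits: peel two from B's list, recurse on m / 100
    rw [toDigits_step, if_neg h10, List.reverse_append, List.reverse_singleton,
        List.singleton_append, toDigits_step (m / 10)]
    by_cases hq10 : m / 10 < 10
    · -- m / 100 = 0: both loops stop after these two digits
      rw [if_pos hq10]
      simp only [List.reverse_singleton, calcB_loop,
        digitChar_toNat (m % 10) (by omega), digitChar_toNat (m / 10) (by omega)]
      rw [show m / 10 % 10 = m / 10 from Nat.mod_eq_of_lt hq10,
          show m / 10 / 10 = 0 from Nat.div_eq_of_lt hq10]
      simp only [Nat.cast_zero, calcA_zero]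
      have h0 : PySem.Int.mod 0 2 = 0 := by decide
      have h1 : PySem.Int.mod (0+1) 2 = 1 := by decide
      rw [h0, h1]
      rw [if_pos rfl, if_neg (by omega : ¬ ((1:Int) = 0))]
      split_ifs with ha hb hb <;> [skip; omega; omega; skip] <;> ring
    · -- m / 100 > 0: recurse
      rw [if_neg hq10, List.reverse_append, List.reverse_singleton, List.singleton_append]
      simp only [calcB_loop, digitChar_toNat (m % 10) (by omega),
        digitChar_toNat (m / 10 % 10) (by omega)]
      have h0 : PySem.Int.mod 0 2 = 0 := by decide
      have h1 : PySem.Int.mod (0+1) 2 = 1 := by decide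
      rw [h0, h1]
      rw [if_pos rfl, if_neg (by omega : ¬ ((1:Int) = 0))]
      rw [show (0:Int) + 1 + 1 = 0 + 2 by ring, calcB_loop_shift]
      rw [ih (m / 10 / 10) (by omega) (by omega)]
      congr 1
      split_ifs with ha hb hb <;> [skip; omega; omega; skip] <;> ring

-- ===== VERDICT (by name: the statement is the Claim_ definition above) =====
theorem calc_soma_spec : Claim_equal_calc_soma := by
  intro n _ hpre
  unfold Spec_calc_soma calc_soma calc_soma_alt
  cases hx : PySem.Int.ofStr? n with
  | none => simp [Pre_calc_soma, hx] at hpre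
  | some x =>
    simp only
    by_cases hle : x ≤ 0
    · rw [if_pos hle, calcA_loop, dif_neg (by omega)]
    · rw [if_neg hle]
      have hcast : ((x.toNat : Nat) : Int) = x := Int.toNat_of_nonneg (by omega)
      have hc : PySem.Int.toChars x = Nat.toDigits 10 x.toNat := by
        simp [PySem.Int.toChars, show ¬ x < 0 by omega]
      rw [hc, loop_eq x.toNat (by omega) 0, hcast]
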